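-- pv_equiv track=rewrite | github.com/liukecai/ml_study | src/pre_train_dataset.py | extract_overlap_hash
-- ===== SOURCE A (Python) =====
-- def extract_overlap_hash(dataset_1, dataset_2):
--     """查找重复图案（通过hash查找）"""
--     overlap = {}
--     dataset_hash_1 = dataset_1
--     dataset_hash_2 = dataset_2
--     for i, hash1 in enumerate(dataset_hash_1):
--         for j, hash2 in enumerate(dataset_hash_2):
--             if hash1 == hash2:
--                 if not i in overlap.keys():
--                     overlap[i] = []
--                 overlap[i].append(j)
--
--     return overlap
-- ===== SOURCE B (Python) =====
-- def extract_overlap_hash(dataset_1, dataset_2):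
--     """查找重复图案（通过hash查找）— index dataset_2 once, then one lookup per element of dataset_1"""
--     index = {}
--     for j, h in enumerate(dataset_2):
--         index.setdefault(h, []).append(j)
--     overlap = {}
--     for i, h in enumerate(dataset_1):
--         if h in index:
--             overlap[i] = list(index[h])
--     return overlap
-- ===== Notes on version B (the rewrite author's own statement) =====
-- stated objective: faster
-- what changed: Replaces A's nested O(n*m) scan with a single pass that indexes dataset_2 into a dict value->list-of-indices, then one dict lookup per element of dataset_1.
import Mathlib
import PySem

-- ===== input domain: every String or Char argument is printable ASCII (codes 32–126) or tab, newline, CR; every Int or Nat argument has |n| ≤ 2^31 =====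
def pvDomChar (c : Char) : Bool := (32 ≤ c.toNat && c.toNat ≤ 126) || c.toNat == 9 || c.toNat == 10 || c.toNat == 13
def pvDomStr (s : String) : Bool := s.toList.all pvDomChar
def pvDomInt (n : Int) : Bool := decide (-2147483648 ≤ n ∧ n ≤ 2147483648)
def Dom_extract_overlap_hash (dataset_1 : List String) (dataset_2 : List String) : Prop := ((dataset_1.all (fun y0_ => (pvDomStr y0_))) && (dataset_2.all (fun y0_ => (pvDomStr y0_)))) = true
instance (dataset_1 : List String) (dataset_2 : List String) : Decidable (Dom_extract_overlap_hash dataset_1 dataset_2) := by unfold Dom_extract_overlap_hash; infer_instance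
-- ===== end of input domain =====

-- B replaces A's nested scan by a one-pass dict index of dataset_2 (value -> list of indices)
-- followed by a single lookup per element of dataset_1; same return value.

-- ===== PORT A =====
-- literal transliteration of A's nested enumerate loops over a dict accumulator
def extract_overlap_hash (dataset_1 : List String) (dataset_2 : List String) : List (Int × List Int) :=
  ((PySem.List.enumerate dataset_1).foldl
    (fun overlap p =>
      (PySem.List.enumerate dataset_2).foldl
        (fun overlap q =>
          if p.2 == q.2 then
            -- `if not i in overlap.keys(): overlap[i] = []` then `overlap[i].append(j)`
            (if overlap.contains p.1 then overlap else overlap.insert p.1 []).modify p.1 [] (· ++ [q.1])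
          else overlap) overlap)
    (PySem.Dict.empty : PySem.Dict Int (List Int))).items

-- ===== PORT B =====
-- `index.setdefault(h, []).append(j)` is ported as modify h [] (· ++ [j]) (same dict effect)
def extract_overlap_hash_alt (dataset_1 : List String) (dataset_2 : List String) : List (Int × List Int) :=
  let index : PySem.Dict String (List Int) :=
    (PySem.List.enumerate dataset_2).foldl
      (fun d q => d.modify q.2 [] (· ++ [q.1])) PySem.Dict.empty
  ((PySem.List.enumerate dataset_1).foldl
    (fun overlap p =>
      if index.contains p.2 then overlap.insert p.1 (index.getD p.2 []) else overlap)
    (PySem.Dict.empty : PySem.Dict Int (List Int))).items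

-- ===== PRECONDITION & SPEC =====
def Spec_extract_overlap_hash (dataset_1 : List String) (dataset_2 : List String) (out : List (Int × List Int)) : Prop := out = extract_overlap_hash_alt dataset_1 dataset_2
instance (dataset_1 : List String) (dataset_2 : List String) (out : List (Int × List Int)) : Decidable (Spec_extract_overlap_hash dataset_1 dataset_2 out) := by unfold Spec_extract_overlap_hash; infer_instance

-- ===== CLAIM (what is proved, stated in full; the proofs are below) =====
def Claim_equal_extract_overlap_hash : Prop := ∀ (dataset_1 : List String) (dataset_2 : List String), Dom_extract_overlap_hash dataset_1 dataset_2 → Spec_extract_overlap_hash dataset_1 dataset_2 (extract_overlap_hash dataset_1 dataset_2)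

-- ===== LEMMAS AND PROOFS =====

-- two modifies at the same key compose
theorem pv_modify_modify (d : PySem.Dict Int (List Int)) (k : Int)
    (f g : List Int → List Int) :
    (d.modify k [] f).modify k [] g = d.modify k [] (fun x => g (f x)) := by
  simp [PySem.Dict.modify, PySem.Dict.getD_insert_self, PySem.Dict.insert_insert_self]

-- modify at an absent key is an insert
theorem pv_modify_not_contains (d : PySem.Dict Int (List Int)) (k : Int)
    (f : List Int → List Int) (hc : d.contains k = false) :
    d.modify k [] f = d.insert k (f []) := by
  simp [PySem.Dict.modify, PySem.Dict.getD_of_not_contains d [] hc]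

-- A's guarded body equals a plain modify
theorem pv_stepA_body (ov : PySem.Dict Int (List Int)) (i : Int) (v : List Int) :
    (if ov.contains i then ov else ov.insert i []).modify i [] (· ++ v)
      = ov.modify i [] (· ++ v) := by
  by_cases hc : ov.contains i = true
  · simp [hc]
  · simp only [Bool.not_eq_true] at hc
    simp [hc, PySem.Dict.modify, PySem.Dict.getD_insert_self,
      PySem.Dict.insert_insert_self, PySem.Dict.getD_of_not_contains ov [] hc]

-- A's inner loop over dataset_2, collapsed to a single conditional modify
theorem pv_innerA (h : String) (i : Int) :
    ∀ (l : List (Int × String)) (ov : PySem.Dict Int (List Int)),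
    l.foldl (fun ov q => if h == q.2 then
        (if ov.contains i then ov else ov.insert i []).modify i [] (· ++ [q.1]) else ov) ov
      = if (l.filter (fun q => q.2 == h)) = [] then ov
        else ov.modify i [] (· ++ (l.filter (fun q => q.2 == h)).map (·.1)) := by
  intro l
  induction l with
  | nil => intro ov; simp
  | cons q l ih =>
    intro ov
    cases hq : (q.2 == h) with
    | false =>
      have hq' : (h == q.2) = false := by
        simp only [beq_eq_false_iff_ne] at hq ⊢
        exact fun e => hq e.symm
      rw [List.foldl_cons, if_neg (by simp [hq']), List.filter_cons, hq]
      simp only [Bool.false_eq_true, if_false]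
      exact ih ov
    | true =>
      have hq' : (h == q.2) = true := by
        simp only [beq_iff_eq] at hq ⊢; exact hq.symm
      rw [List.foldl_cons, if_pos hq', List.filter_cons, hq]
      simp only [if_pos, List.map_cons]
      rw [pv_stepA_body, ih]
      by_cases he : (l.filter (fun q => q.2 == h)) = []
      · simp [he]
      · rw [if_neg he, if_neg (by simp), pv_modify_modify]
        congr 1
        funext x
        simp

-- lookup in B's index = indices of matching elements, in order
theorem pv_index_getD (h : String) :
    ∀ (d2 : List (Int × String)) (d : PySem.Dict String (List Int)),
    (d2.foldl (fun d q => d.modify q.2 [] (· ++ [q.1])) d).getD h []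
      = d.getD h [] ++ (d2.filter (fun q => q.2 == h)).map (·.1) := by
  intro d2
  induction d2 with
  | nil => intro d; simp
  | cons q l ih =>
    intro d
    rw [List.foldl_cons, ih, List.filter_cons]
    cases hq : (q.2 == h) with
    | false =>
      simp only [Bool.false_eq_true, if_false]
      have hne : h ≠ q.2 := by
        simp only [beq_eq_false_iff_ne] at hq
        exact fun e => hq e.symm
      rw [PySem.Dict.modify, PySem.Dict.getD_insert_of_ne d _ _ hne]
    | true =>
      have he : q.2 = h := by simpa using hq
      simp only [if_pos, List.map_cons]
      rw [he, PySem.Dict.getD_modify_self]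
      simp

-- membership in B's index = some element of dataset_2 matches
theorem pv_index_contains (h : String) :
    ∀ (d2 : List (Int × String)) (d : PySem.Dict String (List Int)),
    (d2.foldl (fun d q => d.modify q.2 [] (· ++ [q.1])) d).contains h
      = (d.contains h || d2.any (fun q => q.2 == h)) := by
  intro d2
  induction d2 with
  | nil => intro d; simp
  | cons q l ih =>
    intro d
    rw [List.foldl_cons, ih, List.any_cons, PySem.Dict.modify,
      PySem.Dict.contains_insert]
    cases hq : (q.2 == h) with
    | false =>
      have hq' : (h == q.2) = false := by
        simp only [beq_eq_false_iff_ne] at hq ⊢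
        exact fun e => hq e.symm
      simp [hq']
    | true =>
      have hq' : (h == q.2) = true := by
        simp only [beq_iff_eq] at hq ⊢; simpa using hq.symm
      simp [hq']

-- the outer loops of A and B agree, given every key already present is below the start index
theorem pv_outer (dataset_2 : List String) :
    ∀ (d1 : List String) (s : Int) (ov : PySem.Dict Int (List Int)),
    (∀ k ∈ ov.keys, k < s) →
    (PySem.List.enumerate d1 s).foldl
      (fun overlap p =>
        (PySem.List.enumerate dataset_2).foldl
          (fun overlap q =>
            if p.2 == q.2 then
              (if overlap.contains p.1 then overlap else overlap.insert p.1 []).modify p.1 [] (· ++ [q.1])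
            else overlap) overlap) ov
    = (PySem.List.enumerate d1 s).foldl
      (fun overlap p =>
        if ((PySem.List.enumerate dataset_2).foldl
              (fun d q => d.modify q.2 [] (· ++ [q.1])) PySem.Dict.empty).contains p.2 then
          overlap.insert p.1
            (((PySem.List.enumerate dataset_2).foldl
              (fun d q => d.modify q.2 [] (· ++ [q.1])) PySem.Dict.empty).getD p.2 [])
        else overlap) ov := by
  intro d1
  induction d1 with
  | nil => intro s ov _; simp [PySem.List.enumerate_nil]
  | cons h d1 ih =>
    intro s ov hkeys
    have hcont : ov.contains s = false := by
      cases hc : ov.contains s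
      · rfl
      · exfalso
        have := (PySem.Dict.contains_iff_mem_keys ov s).mp hc
        exact absurd (hkeys s this) (lt_irrefl s)
    rw [PySem.List.enumerate_cons, List.foldl_cons, List.foldl_cons]
    rw [pv_innerA]
    rw [pv_index_contains, pv_index_getD]
    simp only [PySem.Dict.contains_empty, PySem.Dict.getD_empty, Bool.false_or, List.nil_append]
    by_cases he : ((PySem.List.enumerate dataset_2).filter (fun q => q.2 == h)) = []
    · have hany : ((PySem.List.enumerate dataset_2).any (fun q => q.2 == h)) = false := by
        rw [List.any_eq_false]
        exact List.filter_eq_nil_iff.mp he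
      rw [if_pos he, hany]
      simp only [Bool.false_eq_true, if_false]
      exact ih (s + 1) ov (fun k hk => lt_trans (hkeys k hk) (by omega))
    · have hany : ((PySem.List.enumerate dataset_2).any (fun q => q.2 == h)) = true := by
        by_contra hfalse
        rw [Bool.not_eq_true, List.any_eq_false] at hfalse
        exact he (List.filter_eq_nil_iff.mpr hfalse)
      rw [if_neg he, hany, if_pos rfl, pv_modify_not_contains ov s _ hcont]
      simp only [List.nil_append]
      apply ih (s + 1)
      intro k hk
      rw [PySem.Dict.keys_insert_of_not_contains ov _ hcont] at hk
      rcases List.mem_append.mp hk with hk | hk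
      · exact lt_trans (hkeys k hk) (by omega)
      · simp at hk; omega

-- ===== VERDICT (by name: the statement is the Claim_ definition above) =====
theorem extract_overlap_hash_spec : Claim_equal_extract_overlap_hash := by
  intro d1 d2 _
  unfold Spec_extract_overlap_hash extract_overlap_hash extract_overlap_hash_alt
  rw [pv_outer d2 d1 0 PySem.Dict.empty (by simp [PySem.Dict.keys_empty])]
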